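-- pv_equiv track=rewrite | github.com/oONathanOo/revisions-preuve-pratique | 40/1.py | recherche_indices_classement
-- ===== SOURCE A (Python) =====
-- def recherche_indices_classement(elt, tab):
--     r1 = []
--     r2 = []
--     r3 = []
--     idx = enumerate(tab)
--     for i in idx:
--         if i[1] < elt:
--             r1.append(i[0])
--         if i[1] == elt:
--             r2.append(i[0])
--         if i[1] > elt:
--             r3.append(i[0])
--     return (r1, r2, r3)
-- ===== SOURCE B (Python) =====
-- def recherche_indices_classement(elt, tab):
--     r1 = [i for i, x in enumerate(tab) if x < elt]
--     r2 = [i for i, x in enumerate(tab) if x == elt]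
--     r3 = [i for i, x in enumerate(tab) if x > elt]
--     return (r1, r2, r3)
-- ===== Notes on version B (the rewrite author's own statement) =====
-- stated objective: idiomatic
-- what changed: The single loop appending to three accumulators is replaced by three independent filtered comprehensions over enumerate(tab), one pass per output list.
import Mathlib
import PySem

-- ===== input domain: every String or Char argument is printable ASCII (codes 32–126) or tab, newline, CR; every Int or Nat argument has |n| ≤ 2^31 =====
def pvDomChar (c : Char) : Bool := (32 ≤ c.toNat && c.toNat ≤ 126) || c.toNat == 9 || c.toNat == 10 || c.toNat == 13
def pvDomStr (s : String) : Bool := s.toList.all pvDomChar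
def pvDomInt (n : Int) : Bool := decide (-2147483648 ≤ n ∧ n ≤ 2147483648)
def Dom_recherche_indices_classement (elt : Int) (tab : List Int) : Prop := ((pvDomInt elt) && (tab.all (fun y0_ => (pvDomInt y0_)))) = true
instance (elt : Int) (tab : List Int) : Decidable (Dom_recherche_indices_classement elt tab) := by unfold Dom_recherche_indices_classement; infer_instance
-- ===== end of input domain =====

-- B replaces the single three-accumulator loop with three independent filtered comprehensions over enumerate(tab) (idiomatic decomposition; same return value).


-- ===== PORT A =====
-- one pass over enumerate(tab), appending to three accumulators
def recherche_indices_classement (elt : Int) (tab : List Int) : List Int × List Int × List Int :=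
  let idx := PySem.List.enumerate tab
  let st := idx.foldl
    (fun (r : List Int × List Int × List Int) i =>
      let r := if i.2 < elt then (r.1 ++ [i.1], r.2.1, r.2.2) else r
      let r := if i.2 = elt then (r.1, r.2.1 ++ [i.1], r.2.2) else r
      if i.2 > elt then (r.1, r.2.1, r.2.2 ++ [i.1]) else r)
    ([], [], [])
  st

-- ===== PORT B =====
-- three independent filtered comprehensions over enumerate(tab)
def recherche_indices_classement_alt (elt : Int) (tab : List Int) : List Int × List Int × List Int :=
  let r1 := ((PySem.List.enumerate tab).filter (fun p => p.2 < elt)).map (fun p => p.1)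
  let r2 := ((PySem.List.enumerate tab).filter (fun p => p.2 = elt)).map (fun p => p.1)
  let r3 := ((PySem.List.enumerate tab).filter (fun p => p.2 > elt)).map (fun p => p.1)
  (r1, r2, r3)

-- ===== PRECONDITION & SPEC =====
def Spec_recherche_indices_classement (elt : Int) (tab : List Int) (out : List Int × List Int × List Int) : Prop := out = recherche_indices_classement_alt elt tab
instance (elt : Int) (tab : List Int) (out : List Int × List Int × List Int) : Decidable (Spec_recherche_indices_classement elt tab out) := by unfold Spec_recherche_indices_classement; infer_instance

-- ===== CLAIM (what is proved, stated in full; the proofs are below) =====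
def Claim_equal_recherche_indices_classement : Prop := ∀ (elt : Int) (tab : List Int), Dom_recherche_indices_classement elt tab → Spec_recherche_indices_classement elt tab (recherche_indices_classement elt tab)

-- ===== LEMMAS AND PROOFS =====

-- The fold of A, started from any accumulators, appends exactly the three filtered projections.
theorem pv_fold_partition (elt : Int) (l : List (Int × Int)) (a b c : List Int) :
    l.foldl
      (fun (r : List Int × List Int × List Int) i =>
        let r := if i.2 < elt then (r.1 ++ [i.1], r.2.1, r.2.2) else r
        let r := if i.2 = elt then (r.1, r.2.1 ++ [i.1], r.2.2) else r
        if i.2 > elt then (r.1, r.2.1, r.2.2 ++ [i.1]) else r)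
      (a, b, c)
    = (a ++ (l.filter (fun p => p.2 < elt)).map (fun p => p.1),
       b ++ (l.filter (fun p => p.2 = elt)).map (fun p => p.1),
       c ++ (l.filter (fun p => p.2 > elt)).map (fun p => p.1)) := by
  induction l generalizing a b c with
  | nil => simp
  | cons hd tl ih =>
    simp only [List.foldl_cons, List.filter_cons]
    rcases lt_trichotomy hd.2 elt with h | h | h
    · simp [h, ne_of_lt h, not_lt.mpr (le_of_lt h), ih]
    · simp [h, ih]
    · simp [h, ne_of_gt h, not_lt.mpr (le_of_lt h), ih]

-- ===== VERDICT (by name: the statement is the Claim_ definition above) =====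
theorem recherche_indices_classement_spec : Claim_equal_recherche_indices_classement := by
  intro elt tab _
  show _ = _
  simp [recherche_indices_classement, recherche_indices_classement_alt, pv_fold_partition]
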